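-- pv_equiv track=rewrite | github.com/martinaclemente/martina-s-programs | insertionSort.py | insertion_sort_count_swaps
-- ===== SOURCE A (Python) =====
-- def insertion_sort_count_swaps(arr):
--     n = 6
--     swap_count = 0
--
--     for i in range(1, n):
--         key = arr[i]
--         j = i - 1
--
--         while j >= 0 and arr[j] > key:
--             arr[j + 1] = arr[j]
--             j -= 1
--             swap_count += 1
--         arr[j + 1] = key
--
--     return swap_count
-- ===== SOURCE B (Python) =====
-- def insertion_sort_count_swaps(arr):
--     # Count inversions among the first six elements, then sort that prefix in place.
--     count = 0
--     for j in range(6):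
--         for i in range(j):
--             if arr[i] > arr[j]:
--                 count += 1
--     arr[:6] = sorted(arr[:6])
--     return count
-- ===== Notes on version B (the rewrite author's own statement) =====
-- stated objective: alternative
-- what changed: Replaces the shifting insertion-sort pass that counts moves with a pure pairwise inversion count over the first six elements plus a single sorted() call to reproduce the prefix mutation.
import Mathlib
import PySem

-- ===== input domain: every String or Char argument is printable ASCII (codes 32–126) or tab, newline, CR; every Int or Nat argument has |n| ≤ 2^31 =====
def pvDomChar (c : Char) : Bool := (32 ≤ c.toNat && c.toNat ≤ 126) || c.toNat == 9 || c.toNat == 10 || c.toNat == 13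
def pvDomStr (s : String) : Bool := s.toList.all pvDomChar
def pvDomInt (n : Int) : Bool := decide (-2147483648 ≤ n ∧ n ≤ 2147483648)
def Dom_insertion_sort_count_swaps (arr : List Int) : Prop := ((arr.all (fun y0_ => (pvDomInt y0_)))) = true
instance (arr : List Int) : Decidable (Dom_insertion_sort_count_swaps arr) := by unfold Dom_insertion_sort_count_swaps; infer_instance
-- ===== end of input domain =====

-- B counts inversions of the first six elements and sorts the prefix with sorted();
-- A counts shifts while insertion-sorting the prefix in place. Return values agree on
-- Pre_ (length ≥ 6); both Pythons raise IndexError below it. Both Pythons mutate the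
-- first six slots of arr identically on Pre_; the Lean ports model the return value only.

-- ===== PORT A =====
-- inner while loop: state (arr, j+1 as a Nat, swap_count); under Pre_ every index is
-- in range, so List.getD _ 0 is exact for Python's arr[...] there (outside Pre_ A raises).
def pyWhileA : List Int → Int → Nat → Int → (List Int × Nat × Int)
  | arr, _, 0, cnt => (arr, 0, cnt)
  | arr, key, j + 1, cnt =>
    if arr.getD j 0 > key then
      pyWhileA (arr.set (j + 1) (arr.getD j 0)) key j (cnt + 1)
    else (arr, j + 1, cnt)

-- one iteration of A's outer for-loop, i the loop index
def stepA (st : List Int × Int) (i : Nat) : List Int × Int :=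
  let key := st.1.getD i 0
  let r := pyWhileA st.1 key i st.2
  (r.1.set r.2.1 key, r.2.2)

def insertion_sort_count_swaps (arr : List Int) : Int :=
  (([1, 2, 3, 4, 5] : List Nat).foldl stepA (arr, 0)).2

-- ===== PORT B =====
-- nested counting loops of Source B (the final 'arr[:6] = sorted(arr[:6])' mutation does not
-- affect the return value and is not modelled)
def insertion_sort_count_swaps_alt (arr : List Int) : Int :=
  (List.range 6).foldl
    (fun c j => (List.range j).foldl
      (fun c i => if arr.getD i 0 > arr.getD j 0 then c + 1 else c) c) 0

-- ===== PRECONDITION & SPEC =====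
-- Pre_: exactly the inputs on which Python A returns (len(arr) < 6 raises IndexError)
def Pre_insertion_sort_count_swaps (arr : List Int) : Prop := 6 ≤ arr.length
instance (arr : List Int) : Decidable (Pre_insertion_sort_count_swaps arr) := by
  unfold Pre_insertion_sort_count_swaps; infer_instance

def pvWitness_insertion_sort_count_swaps : List Int := [3, 1, 4, 1, 5, 9, 2]

def Spec_insertion_sort_count_swaps (arr : List Int) (out : Int) : Prop := out = insertion_sort_count_swaps_alt arr
instance (arr : List Int) (out : Int) : Decidable (Spec_insertion_sort_count_swaps arr out) := by unfold Spec_insertion_sort_count_swaps; infer_instance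

-- ===== CLAIM (what is proved, stated in full; the proofs are below) =====
def Claim_equal_insertion_sort_count_swaps : Prop := ∀ (arr : List Int), Dom_insertion_sort_count_swaps arr → Pre_insertion_sort_count_swaps arr → Spec_insertion_sort_count_swaps arr (insertion_sort_count_swaps arr)

-- ===== LEMMAS AND PROOFS =====

-- insert x after all elements ≤ x (what A's shifting loop achieves on a sorted prefix)
def insLt (x : Int) : List Int → List Int
  | [] => [x]
  | y :: l => if x < y then x :: y :: l else y :: insLt x l

-- common spec: number of inversions among the first t entries, grouped by the later index
def invUpTo (arr : List Int) : Nat → Int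
  | 0 => 0
  | t + 1 => invUpTo arr t +
      ((arr.take t).countP (fun y => decide (arr.getD t 0 < y)) : Int)

lemma insLt_perm (x : Int) (l : List Int) : (insLt x l).Perm (x :: l) := by
  induction l with
  | nil => simp [insLt]
  | cons y l ih =>
    simp only [insLt]
    split_ifs
    · exact List.Perm.refl _
    · exact (ih.cons y).trans (List.Perm.swap x y l)

lemma insLt_sorted (x : Int) (l : List Int) (h : l.Pairwise (· ≤ ·)) :
    (insLt x l).Pairwise (· ≤ ·) := by
  induction l with
  | nil => simp [insLt]
  | cons y l ih =>
    rw [List.pairwise_cons] at h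
    simp only [insLt]
    split_ifs with hx
    · rw [List.pairwise_cons]
      refine ⟨?_, List.pairwise_cons.mpr h⟩
      intro b hb
      rcases List.mem_cons.mp hb with rfl | hb
      · exact le_of_lt hx
      · exact le_trans (le_of_lt hx) (h.1 b hb)
    · rw [List.pairwise_cons]
      refine ⟨?_, ih h.2⟩
      intro b hb
      rcases List.mem_cons.mp ((insLt_perm x l).mem_iff.mp hb) with rfl | hb
      · exact le_of_not_gt hx
      · exact h.1 b hb

lemma insLt_append_last (x : Int) (l : List Int) (h : ∀ y ∈ l, ¬ x < y) :
    insLt x l = l ++ [x] := by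
  induction l with
  | nil => simp [insLt]
  | cons y l ih =>
    simp only [insLt]
    rw [if_neg (h y (by simp)), ih (fun y hy => h y (by simp [hy]))]
    simp

lemma insLt_append_single (x z : Int) (l : List Int) (h : x < z) :
    insLt x (l ++ [z]) = insLt x l ++ [z] := by
  induction l with
  | nil => simp [insLt, h]
  | cons y l ih =>
    simp only [List.cons_append, insLt]
    split_ifs <;> simp [ih]

lemma countP_take_succ (arr : List Int) (t : Nat) (h : t < arr.length)
    (p : Int → Bool) :
    (arr.take (t + 1)).countP p = (arr.take t).countP p + (if p arr[t] then 1 else 0) := by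
  rw [List.take_succ, List.countP_append]
  simp [List.getElem?_eq_getElem h, List.countP_cons]

-- core characterisation of A's while loop (+ the trailing arr[j+1] = key) on a sorted prefix
lemma pyWhileA_spec (j1 : Nat) : ∀ (s : List Int) (key cnt : Int),
    j1 < s.length → (s.take j1).Pairwise (· ≤ ·) →
    ((pyWhileA s key j1 cnt).1.set (pyWhileA s key j1 cnt).2.1 key,
      (pyWhileA s key j1 cnt).2.2) =
      (insLt key (s.take j1) ++ s.drop (j1 + 1),
       cnt + ((s.take j1).countP (fun y => decide (key < y)) : Int)) := by
  induction j1 with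
  | zero =>
    intro s key cnt hlen _
    cases s with
    | nil => simp at hlen
    | cons a s => simp [pyWhileA, insLt]
  | succ j ih =>
    intro s key cnt hlen hsort
    have hj : j < s.length := by omega
    have htake : s.take (j + 1) = s.take j ++ [s[j]] := by
      rw [List.take_succ]; simp [List.getElem?_eq_getElem hj]
    have hgetD : s.getD j 0 = s[j] := List.getD_eq_getElem s 0 hj
    have hsort' : (s.take j).Pairwise (· ≤ ·) := by
      rw [htake, List.pairwise_append] at hsort; exact hsort.1
    have hle : ∀ y ∈ s.take j, y ≤ s[j] := by
      rw [htake, List.pairwise_append] at hsort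
      intro y hy
      exact hsort.2.2 y hy s[j] (by simp)
    simp only [pyWhileA, hgetD]
    split_ifs with hcmp
    · -- key < s[j]: shift and recurse
      set s' := s.set (j + 1) s[j] with hs'
      have hlen' : j < s'.length := by simp [hs']; omega
      have htks' : s'.take j = s.take j := List.take_set_of_le (by omega)
      have hrec := ih s' key (cnt + 1) hlen' (by rw [htks']; exact hsort')
      rw [hrec]
      have hset : s' = s.take (j + 1) ++ s[j] :: s.drop (j + 2) := by
        rw [hs', List.set_eq_take_cons_drop _ (by omega)]
      have hdrop : s'.drop (j + 1) = s[j] :: s.drop (j + 2) := by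
        rw [hset, List.drop_append_of_le_length (by simp; omega)]
        simp [List.drop_take]
      have hcnt : ((s.take (j + 1)).countP (fun y => decide (key < y)) : Int) =
          (s.take j).countP (fun y => decide (key < y)) + 1 := by
        rw [countP_take_succ s j hj, if_pos (by simpa using hcmp)]
        push_cast; ring
      rw [htks', hdrop, hcnt, htake, insLt_append_single key s[j] _ hcmp]
      rw [Prod.mk.injEq]
      constructor
      · simp
      · ring
    · -- s[j] ≤ key: stop; key goes to the end of the prefix
      have hall : ∀ y ∈ s.take (j + 1), ¬ key < y := by
        intro y hy
        rw [htake, List.mem_append] at hy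
        rcases hy with hy | hy
        · have := hle y hy; omega
        · simp at hy; omega
      have hcnt : (s.take (j + 1)).countP (fun y => decide (key < y)) = 0 := by
        rw [List.countP_eq_zero]
        intro y hy; simpa using hall y hy
      rw [Prod.mk.injEq]
      constructor
      · rw [List.set_eq_take_cons_drop _ (by omega : j + 1 < s.length),
          insLt_append_last key _ hall]
        simp
      · rw [hcnt]; simp

-- A's outer loop invariant: after indices 1..m the prefix is a sorted permutation of
-- the original first m+1 elements and the counter is invUpTo (m+1)
lemma outer_spec (m : Nat) : ∀ (arr : List Int), m < arr.length →
    ∃ P : List Int, P.Perm (arr.take (m + 1)) ∧ P.Pairwise (· ≤ ·) ∧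
      (List.range' 1 m).foldl stepA (arr, 0) = (P ++ arr.drop (m + 1), invUpTo arr (m + 1)) := by
  induction m with
  | zero =>
    intro arr hlen
    refine ⟨arr.take 1, List.Perm.refl _, ?_, ?_⟩
    · cases arr with
      | nil => simp
      | cons a l => simp
    · simp only [List.range'_zero, List.foldl_nil, Prod.mk.injEq]
      exact ⟨(List.take_append_drop 1 arr).symm, by simp [invUpTo]⟩
  | succ m ih =>
    intro arr hlen
    obtain ⟨P, hperm, hsort, hfold⟩ := ih arr (by omega)
    have hPlen : P.length = m + 1 := by
      rw [hperm.length_eq, List.length_take, Nat.min_eq_left (by omega)]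
    set s := P ++ arr.drop (m + 1) with hs
    have hslen : s.length = arr.length := by
      rw [hs, List.length_append, hPlen, List.length_drop]; omega
    have htakeP : s.take (m + 1) = P := by
      rw [hs, List.take_append_of_le_length (by omega), List.take_of_length_le (by omega)]
    have hm1 : m + 1 < arr.length := hlen
    have hgetDs : s.getD (m + 1) 0 = arr.getD (m + 1) 0 := by
      rw [List.getD_eq_getElem?_getD, List.getD_eq_getElem?_getD, hs,
        List.getElem?_append_right (by omega), hPlen, Nat.sub_self, List.getElem?_drop]
    have hdrops : s.drop (m + 2) = arr.drop (m + 2) := by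
      rw [hs, List.drop_append, List.drop_eq_nil_of_le (by omega), List.drop_drop, hPlen]
      rw [show m + 1 + (m + 2 - (m + 1)) = m + 2 by omega]
      simp
    have hrange : List.range' 1 (m + 1) = List.range' 1 m ++ [1 + m] := by
      have h := List.range'_concat (s := 1) (n := m) (step := 1)
      simpa using h
    rw [hrange, List.foldl_append, hfold]
    have hstep := pyWhileA_spec (m + 1) s (s.getD (m + 1) 0) (invUpTo arr (m + 1))
      (by omega) (by rw [htakeP]; exact hsort)
    rw [htakeP, hgetDs] at hstep
    refine ⟨insLt (arr.getD (m + 1) 0) P, ?_, insLt_sorted _ _ hsort, ?_⟩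
    · have h2 : arr.take (m + 2) = arr.take (m + 1) ++ [arr.getD (m + 1) 0] := by
        rw [List.take_succ, List.getElem?_eq_getElem hm1, List.getD_eq_getElem arr 0 hm1]
        simp
      refine (insLt_perm _ _).trans ?_
      rw [h2]
      exact ((hperm.cons _).trans (List.perm_append_singleton _ _).symm)
    · simp only [List.foldl_cons, List.foldl_nil]
      have h1m : 1 + m = m + 1 := by omega
      rw [h1m]
      have hstepA : stepA (s, invUpTo arr (m + 1)) (m + 1) =
          ((pyWhileA s (s.getD (m + 1) 0) (m + 1) (invUpTo arr (m + 1))).1.set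
              (pyWhileA s (s.getD (m + 1) 0) (m + 1) (invUpTo arr (m + 1))).2.1
              (s.getD (m + 1) 0),
            (pyWhileA s (s.getD (m + 1) 0) (m + 1) (invUpTo arr (m + 1))).2.2) := rfl
      rw [hstepA, hgetDs]
      rw [Prod.mk.injEq] at hstep
      obtain ⟨hstep1, hstep2⟩ := hstep
      rw [Prod.mk.injEq]
      constructor
      · rw [hstep1, hdrops]
      · rw [hstep2]
        have hcP : P.countP (fun y => decide (arr.getD (m + 1) 0 < y)) =
            (arr.take (m + 1)).countP (fun y => decide (arr.getD (m + 1) 0 < y)) :=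
          hperm.countP_eq _
        simp only [invUpTo, hcP]

-- B's inner loop counts the greater elements of the prefix
lemma inner_B (arr : List Int) (key : Int) (n : Nat) (hn : n ≤ arr.length) :
    ∀ c : Int, (List.range n).foldl
        (fun c i => if arr.getD i 0 > key then c + 1 else c) c =
      c + ((arr.take n).countP (fun y => decide (key < y)) : Int) := by
  induction n with
  | zero => intro c; simp
  | succ n ih =>
    intro c
    have hn' : n < arr.length := by omega
    rw [List.range_succ, List.foldl_append, ih (by omega)]
    simp only [List.foldl_cons, List.foldl_nil]
    rw [countP_take_succ arr n hn', List.getD_eq_getElem arr 0 hn']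
    simp only [decide_eq_true_eq, gt_iff_lt]
    split_ifs with h
    · push_cast; ring
    · push_cast; ring

-- B's outer loop builds invUpTo
lemma outer_B (arr : List Int) (t : Nat) (ht : t ≤ arr.length) :
    (List.range t).foldl
      (fun c j => (List.range j).foldl
        (fun c i => if arr.getD i 0 > arr.getD j 0 then c + 1 else c) c) 0 =
      invUpTo arr t := by
  induction t with
  | zero => simp [invUpTo]
  | succ t ih =>
    rw [List.range_succ, List.foldl_append, ih (by omega)]
    simp only [List.foldl_cons, List.foldl_nil]
    rw [inner_B arr (arr.getD t 0) t (by omega)]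
    simp [invUpTo]

-- ===== VERDICT (by name: the statement is the Claim_ definition above) =====
theorem insertion_sort_count_swaps_spec : Claim_equal_insertion_sort_count_swaps := by
  intro arr _ hpre
  unfold Spec_insertion_sort_count_swaps insertion_sort_count_swaps insertion_sort_count_swaps_alt
  have hpre' : 6 ≤ arr.length := hpre
  obtain ⟨P, _, _, hfold⟩ := outer_spec 5 arr (by omega)
  have hr : ([1, 2, 3, 4, 5] : List Nat) = List.range' 1 5 := by decide
  rw [hr, hfold, outer_B arr 6 (by omega)]
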